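-- pv_equiv track=rewrite | github.com/8-oo-8/python_files | funnyStuff/ordered_words.py | sorted_words
-- ===== SOURCE A (Python) =====
-- def sorted_words(word_list):
--     result = []
--     for i in range(0, len(word_list)):
--         check = True
--         for j in range(0, len(word_list[i]) - 1):
--             if not check:
--                 break
--             if word_list[i][j] > word_list[i][j+1]:
--                 check = False
--         if check:
--             result.append(word_list[i])
--     result.sort()
--     return result
-- ===== SOURCE B (Python) =====
-- def sorted_words(word_list):
--     return sorted(w for w in word_list if list(w) == sorted(w))
-- ===== Notes on version B (the rewrite author's own statement) =====
-- stated objective: idiomatic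
-- what changed: The index-driven pairwise scan with a break flag is replaced by a one-line filter whose sortedness test sorts each word's characters and compares to the original, then sorts the survivors.
import Mathlib
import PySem

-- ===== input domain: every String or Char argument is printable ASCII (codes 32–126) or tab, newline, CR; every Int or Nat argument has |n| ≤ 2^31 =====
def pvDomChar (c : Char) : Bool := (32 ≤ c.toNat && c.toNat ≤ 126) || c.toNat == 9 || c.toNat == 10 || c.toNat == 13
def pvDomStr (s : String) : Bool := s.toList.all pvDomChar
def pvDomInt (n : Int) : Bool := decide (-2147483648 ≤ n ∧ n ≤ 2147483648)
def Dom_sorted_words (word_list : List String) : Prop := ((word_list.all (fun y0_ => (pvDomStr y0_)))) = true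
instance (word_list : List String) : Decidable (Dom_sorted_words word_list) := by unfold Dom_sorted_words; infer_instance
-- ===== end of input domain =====

-- B replaces A's index-driven pairwise scan (with a break flag) by a filter whose
-- sortedness test sorts each word's characters and compares to the original; idiomatic, same cost class.

-- ===== PORT A =====
-- inner loop of A on one word's characters: the 'break' on ¬check is modelled by
-- keeping the absorbing false state (identical result, since the loop body only reads check)
def swCheck (cs : List Char) : Bool :=
  (PySem.List.pyRange 0 ((cs.length : Int) - 1) 1).foldl
    (fun check j =>
      if !check then check
      else if PySem.List.pyGetD cs j ' ' > PySem.List.pyGetD cs (j+1) ' ' then false else check)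
    true

def sorted_words (word_list : List String) : List String :=
  PySem.List.sorted
    ((PySem.List.pyRange 0 (word_list.length : Int) 1).foldl
      (fun result i =>
        if swCheck (PySem.List.pyGetD word_list i "").toList
        then result ++ [PySem.List.pyGetD word_list i ""] else result) [])
    (fun x => x) false

-- ===== PORT B =====
def sorted_words_alt (word_list : List String) : List String :=
  PySem.List.sorted
    (word_list.filter (fun w => w.toList == PySem.List.sorted w.toList (fun c => c) false))
    (fun x => x) false

-- ===== PRECONDITION & SPEC =====
def Spec_sorted_words (word_list : List String) (out : List String) : Prop := out = sorted_words_alt word_list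
instance (word_list : List String) (out : List String) : Decidable (Spec_sorted_words word_list out) := by unfold Spec_sorted_words; infer_instance

-- ===== CLAIM (what is proved, stated in full; the proofs are below) =====
def Claim_equal_sorted_words : Prop := ∀ (word_list : List String), Dom_sorted_words word_list → Spec_sorted_words word_list (sorted_words word_list)

-- ===== LEMMAS AND PROOFS =====

-- the absorbing-false flag fold is an 'all' over the range
lemma foldl_flag_all (l : List Int) (p : Int → Prop) [DecidablePred p] (b : Bool) :
    l.foldl (fun check j => if !check then check else if p j then false else check) b
      = (b && l.all (fun j => !decide (p j))) := by
  induction l generalizing b with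
  | nil => simp
  | cons x t ih =>
    simp only [List.foldl_cons, List.all_cons, ih]
    by_cases hx : p x <;> cases b <;> simp [hx]

lemma swCheck_iff_chain (cs : List Char) :
    swCheck cs = true ↔ List.IsChain (· ≤ ·) cs := by
  rw [swCheck, foldl_flag_all, Bool.true_and, List.all_eq_true, List.isChain_iff_getElem]
  constructor
  · intro h i hi
    have := h (i : Int) (by rw [PySem.List.mem_pyRange_one]; omega)
    rw [PySem.List.pyGetD_eq_getElem cs (i := (i : Int)) ' ' (by omega) (by exact_mod_cast (by omega : (i:Int) < (cs.length : Int))),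
      PySem.List.pyGetD_eq_getElem cs (i := (i : Int) + 1) ' ' (by omega) (by exact_mod_cast (by omega : (i:Int)+1 < (cs.length : Int)))] at this
    have h1 : ((i : Int).toNat) = i := by omega
    have h2 : (((i : Int)+1).toNat) = i + 1 := by omega
    simp only [h1, h2, Bool.not_eq_true', decide_eq_false_iff_not, not_lt] at this
    exact this
  · intro h j hj
    rw [PySem.List.mem_pyRange_one] at hj
    have hj1 : (j.toNat) + 1 < cs.length := by omega
    rw [PySem.List.pyGetD_eq_getElem cs (i := j) ' ' (by omega) (by omega),
      PySem.List.pyGetD_eq_getElem cs (i := j + 1) ' ' (by omega) (by omega)]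
    have h2 : ((j+1).toNat) = j.toNat + 1 := by omega
    simp only [h2, Bool.not_eq_true', decide_eq_false_iff_not, not_lt]
    exact h j.toNat hj1

lemma swCheck_eq_sorted (cs : List Char) :
    swCheck cs = (cs == PySem.List.sorted cs (fun c => c) false) := by
  rw [Bool.eq_iff_iff, swCheck_iff_chain, beq_iff_eq]
  constructor
  · intro hch
    have hp : cs.Pairwise (fun a b => (fun c : Char => c) a ≤ (fun c : Char => c) b) := by
      simpa using List.isChain_iff_pairwise.mp hch
    exact (PySem.List.sorted_eq_self_of_pairwise cs (fun c => c) hp).symm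
  · intro h
    have hp := PySem.List.sorted_pairwise cs (fun c : Char => c)
    rw [← h] at hp
    exact List.isChain_iff_pairwise.mpr (by simpa using hp)

-- ===== VERDICT (by name: the statement is the Claim_ definition above) =====
theorem sorted_words_spec : Claim_equal_sorted_words := by
  intro wl _
  unfold Spec_sorted_words sorted_words sorted_words_alt
  rw [PySem.List.foldl_pyRange_zero_pyGetD' wl ""
      (fun acc w => if swCheck w.toList then acc ++ [w] else acc) [],
    PySem.List.foldl_append_if_eq_filter]
  congr 1
  simp only [List.nil_append]
  exact List.filter_congr (fun w _ => swCheck_eq_sorted w.toList)
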